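-- pv_equiv track=rewrite | github.com/lza6/AIWriteX-main | src/ai_write_x/core/batch_processor.py | _split_combined_result
-- ===== SOURCE A (Python) =====
-- from typing import Any, Callable, Dict, List, Optional, Tuple
--
-- def _split_combined_result(combined: str, count: int) -> List[str]:
--     """拆分合并的结果"""
--     results = []
--
--     for i in range(1, count + 1):
--         start_tag = f"[RESPONSE_{i}]"
--         end_tag = f"[RESPONSE_{i+1}]" if i < count else None
--
--         start_idx = combined.find(start_tag)
--         if start_idx == -1:
--             results.append(f"[批处理解析错误] 未找到 {start_tag}")
--             continue
--
--         start_idx += len(start_tag)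
--
--         if end_tag:
--             end_idx = combined.find(end_tag)
--             if end_idx == -1:
--                 end_idx = len(combined)
--         else:
--             end_idx = len(combined)
--
--         result = combined[start_idx:end_idx].strip()
--         results.append(result)
--
--     # 确保结果数量匹配
--     while len(results) < count:
--         results.append("[批处理错误] 结果缺失")
--
--     return results[:count]
-- ===== SOURCE B (Python) =====
-- from typing import List
--
--
-- def _split_combined_result(combined: str, count: int) -> List[str]:
--     """拆分合并的结果 — one pass over the string instead of one find() per tag."""
--     PREFIX = "[RESPONSE_"
--     n = len(combined)
--     # Single pass: first position of every well-formed "[RESPONSE_<digits>]" tag, keyed by its digit string.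
--     firsts = {}
--     for pos in range(n):
--         if combined.startswith(PREFIX, pos):
--             tail = combined[pos + 10:]
--             d = 0
--             while d < len(tail) and "0" <= tail[d] <= "9":
--                 d += 1
--             if d > 0 and d < len(tail) and tail[d] == "]":
--                 key = tail[:d]
--                 if key not in firsts:
--                     firsts[key] = pos
--     out = []
--     for i in range(1, count + 1):
--         s = str(i)
--         if s not in firsts:
--             out.append(f"[批处理解析错误] 未找到 [RESPONSE_{s}]")
--             continue
--         start = firsts[s] + 10 + len(s) + 1
--         end = firsts.get(str(i + 1), n) if i < count else n
--         out.append(combined[start:end].strip())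
--     return out
-- ===== Notes on version B (the rewrite author's own statement) =====
-- stated objective: faster
-- what changed: Instead of calling str.find once (twice) per tag for each of the count tags, B makes a single pass over the string recording the first position of every well-formed [RESPONSE_<digits>] tag in a dict keyed by the digit string, then assembles each slice by dict lookup.
import Mathlib
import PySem

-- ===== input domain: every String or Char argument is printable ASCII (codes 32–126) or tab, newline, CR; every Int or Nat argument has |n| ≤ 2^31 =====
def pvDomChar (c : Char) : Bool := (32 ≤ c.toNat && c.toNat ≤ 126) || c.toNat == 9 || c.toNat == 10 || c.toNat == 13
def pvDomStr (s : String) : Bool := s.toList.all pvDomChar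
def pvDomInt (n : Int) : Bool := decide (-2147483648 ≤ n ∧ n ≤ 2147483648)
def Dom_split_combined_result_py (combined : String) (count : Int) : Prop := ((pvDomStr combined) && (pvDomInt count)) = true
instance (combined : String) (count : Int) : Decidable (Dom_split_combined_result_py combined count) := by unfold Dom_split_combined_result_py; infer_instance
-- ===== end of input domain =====

-- B replaces A's per-tag str.find scans by one single pass that records the first
-- position of every well-formed "[RESPONSE_<digits>]" tag, then slices (objective: faster).


-- ===== PORT A =====
-- literal transliteration of _split_combined_result: one find per tag (two when an
-- end tag is needed), per i in range(1, count+1); the final 'while len(results) < count'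
-- loop is ported as appending the missing number of placeholder entries (its exact effect).
def split_combined_result_py (combined : String) (count : Int) : List String :=
  let cs := combined.toList
  let results : List String :=
    (PySem.List.pyRange 1 (count + 1)).foldl (fun results i =>
      let start_tag : List Char := "[RESPONSE_".toList ++ PySem.Int.toChars i ++ "]".toList
      let end_tag : Option (List Char) :=
        if i < count then some ("[RESPONSE_".toList ++ PySem.Int.toChars (i + 1) ++ "]".toList)
        else none
      let start_idx := PySem.Chars.find cs start_tag
      if start_idx = -1 then
        results ++ [String.ofList ("[批处理解析错误] 未找到 ".toList ++ start_tag)]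
      else
        let start_idx := start_idx + (start_tag.length : Int)
        let end_idx : Int :=
          match end_tag with
          | some t =>
            let e := PySem.Chars.find cs t
            if e = -1 then (cs.length : Int) else e
          | none => (cs.length : Int)
        results ++ [String.ofList (PySem.Chars.strip
            (PySem.Chars.slice cs (some start_idx) (some end_idx)))]) []
  let results := results ++ List.replicate (count.toNat - results.length) "[批处理错误] 结果缺失"
  PySem.List.slice results none (some count)

-- ===== PORT B =====
-- transliteration of Source B: one pass over positions 0..n-1 building `firsts`
-- (the inner digit-run while-loop is List.takeWhile on the tail — its exact effect),
-- then one dict lookup per i.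
def split_combined_result_py_alt (combined : String) (count : Int) : List String :=
  let cs := combined.toList
  let n := cs.length
  let firsts : PySem.Dict (List Char) Int :=
    (PySem.List.pyRange 0 (n : Int)).foldl (fun d pos =>
      if "[RESPONSE_".toList.isPrefixOf (cs.drop pos.toNat) then
        let tail := cs.drop (pos.toNat + 10)
        let key := tail.takeWhile (fun c => decide ('0' ≤ c ∧ c ≤ '9'))
        if key.length > 0 ∧ tail[key.length]? = some ']' then
          if (d.get? key).isNone then d.insert key pos else d
        else d
      else d) PySem.Dict.empty
  (PySem.List.pyRange 1 (count + 1)).foldl (fun out i =>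
    let s := PySem.Int.toChars i
    match firsts.get? s with
    | none => out ++ [String.ofList ("[批处理解析错误] 未找到 [RESPONSE_".toList ++ s ++ "]".toList)]
    | some p =>
      let start := p + 10 + (s.length : Int) + 1
      let endI : Int := if i < count then firsts.getD (PySem.Int.toChars (i + 1)) (n : Int) else (n : Int)
      out ++ [String.ofList (PySem.Chars.strip
          (PySem.Chars.slice cs (some start) (some endI)))]) []

-- ===== PRECONDITION & SPEC =====
def Spec_split_combined_result_py (combined : String) (count : Int) (out : List String) : Prop := out = split_combined_result_py_alt combined count
instance (combined : String) (count : Int) (out : List String) : Decidable (Spec_split_combined_result_py combined count out) := by unfold Spec_split_combined_result_py; infer_instance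

-- ===== CLAIM (what is proved, stated in full; the proofs are below) =====
def Claim_equal_split_combined_result_py : Prop := ∀ (combined : String) (count : Int), Dom_split_combined_result_py combined count → Spec_split_combined_result_py combined count (split_combined_result_py combined count)

-- ===== LEMMAS AND PROOFS =====
-- digit facts about Int.toChars
def pvDig (c : Char) : Bool := decide ('0' ≤ c ∧ c ≤ '9')

lemma pv_digitChar (k : Nat) (h : k < 10) : pvDig (Nat.digitChar k) = true := by
  interval_cases k <;> decide

lemma pv_toDigitsCore_all (f : Nat) : ∀ (n : Nat) (ds : List Char),
    (∀ c ∈ ds, pvDig c = true) → ∀ c ∈ Nat.toDigitsCore 10 f n ds, pvDig c = true := by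
  induction f with
  | zero => intro n ds hds; rw [Nat.toDigitsCore.eq_def]; exact hds
  | succ f ih =>
    intro n ds hds
    rw [Nat.toDigitsCore.eq_def]
    dsimp only
    split
    · intro c hc
      rcases List.mem_cons.mp hc with h | h
      · subst h; exact pv_digitChar _ (Nat.mod_lt _ (by norm_num))
      · exact hds c h
    · exact ih _ _ (by
        intro c hc
        rcases List.mem_cons.mp hc with h | h
        · subst h; exact pv_digitChar _ (Nat.mod_lt _ (by norm_num))
        · exact hds c h)

lemma pv_toDigitsCore_len (f : Nat) : ∀ (n : Nat) (ds : List Char),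
    ds.length ≤ (Nat.toDigitsCore 10 f n ds).length := by
  induction f with
  | zero => intro n ds; rw [Nat.toDigitsCore.eq_def]
  | succ f ih =>
    intro n ds
    rw [Nat.toDigitsCore.eq_def]
    dsimp only
    split
    · simp
    · exact le_trans (by simp) (ih _ (_ :: ds))

lemma pv_toChars_digits (i : Int) (h : 1 ≤ i) :
    PySem.Int.toChars i ≠ [] ∧ ∀ c ∈ PySem.Int.toChars i, pvDig c = true := by
  unfold PySem.Int.toChars
  rw [if_neg (by omega)]
  unfold Nat.toDigits
  constructor
  · intro hnil
    rw [Nat.toDigitsCore.eq_def] at hnil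
    dsimp only at hnil
    split at hnil
    · simp at hnil
    · have h2 := pv_toDigitsCore_len i.toNat (i.toNat / 10) [(i.toNat % 10).digitChar]
      rw [hnil] at h2; simp at h2
  · exact pv_toDigitsCore_all _ _ _ (by simp)

def pvP : List Char := "[RESPONSE_".toList

def pvKey (cs : List Char) (pos : Nat) : List Char :=
  (cs.drop (pos + 10)).takeWhile pvDig

def pvMatch (cs k : List Char) (pos : Nat) : Bool :=
  pvP.isPrefixOf (cs.drop pos) && (pvKey cs pos == k) && decide (0 < k.length)
    && ((cs.drop (pos + 10))[k.length]? == some ']')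

lemma pv_hit_iff (cs t : List Char) (ht0 : t ≠ []) (htd : ∀ c ∈ t, pvDig c = true) (pos : Nat) :
    (pvP ++ t ++ [']']) <+: cs.drop pos ↔ pvMatch cs t pos = true := by
  have hPlen : pvP.length = 10 := by decide
  have hdd : (cs.drop pos).drop 10 = cs.drop (pos + 10) := by
    rw [List.drop_drop]
  constructor
  · rintro ⟨r, hr⟩
    have htail : cs.drop (pos + 10) = t ++ ']' :: r := by
      rw [← hdd, ← hr]
      simp [List.append_assoc, ← hPlen]
    have htw : (cs.drop (pos + 10)).takeWhile pvDig = t := by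
      rw [htail, List.takeWhile_append]
      rw [List.takeWhile_eq_self_iff.mpr htd]
      simp [pvDig]
    unfold pvMatch pvKey
    simp only [Bool.and_eq_true, beq_iff_eq, decide_eq_true_eq]
    refine ⟨⟨⟨List.isPrefixOf_iff_prefix.mpr ⟨t ++ [']'] ++ r, by rw [← hr]; simp⟩, htw⟩,
      by simpa using List.length_pos_iff.mpr ht0⟩, ?_⟩
    rw [htail]
    simp
  · intro hm
    unfold pvMatch pvKey at hm
    simp only [Bool.and_eq_true, beq_iff_eq, decide_eq_true_eq] at hm
    obtain ⟨⟨⟨hpre, htw⟩, _⟩, hbr⟩ := hm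
    have hpre' : pvP <+: cs.drop pos := List.isPrefixOf_iff_prefix.mp hpre
    have hsplit : cs.drop pos = pvP ++ cs.drop (pos + 10) := by
      conv_lhs => rw [← List.take_append_drop 10 (cs.drop pos)]
      rw [hdd]
      congr 1
      rw [List.prefix_iff_eq_take.mp hpre', hPlen]
    have ht : t <+: cs.drop (pos + 10) := htw ▸ List.takeWhile_prefix pvDig
    obtain ⟨u, hu⟩ := ht
    rw [← hu, List.getElem?_append_right (le_refl t.length)] at hbr
    simp at hbr
    rcases u with _ | ⟨c, u'⟩
    · simp at hbr
    · simp at hbr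
      subst hbr
      exact ⟨u', by rw [hsplit, ← hu]; simp⟩

def pvStep (cs : List Char) (d : PySem.Dict (List Char) Int) (pos : Nat) : PySem.Dict (List Char) Int :=
  if pvP.isPrefixOf (cs.drop pos) then
    let tail := cs.drop (pos + 10)
    let key := tail.takeWhile pvDig
    if key.length > 0 ∧ tail[key.length]? = some ']' then
      if (d.get? key).isNone then d.insert key (pos : Int) else d
    else d
  else d

lemma pv_fold_get (cs : List Char) (m : Nat) (k : List Char) :
    ((List.range m).foldl (pvStep cs) PySem.Dict.empty).get? k
      = ((List.range m).find? (fun pos => pvMatch cs k pos)).map (fun pos : Nat => (pos : Int)) := by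
  induction m with
  | zero => simp
  | succ m ih =>
    rw [List.range_succ, List.foldl_append, List.find?_append]
    simp only [List.foldl_cons, List.foldl_nil]
    by_cases hpre : pvP.isPrefixOf (cs.drop m)
    · set key := (cs.drop (m + 10)).takeWhile pvDig with hkey
      by_cases hcond : key.length > 0 ∧ (cs.drop (m + 10))[key.length]? = some ']'
      · have hmk : ∀ k', pvMatch cs k' m = true ↔ k' = key := by
          intro k'
          unfold pvMatch pvKey
          simp only [Bool.and_eq_true, beq_iff_eq, decide_eq_true_eq]
          constructor
          · rintro ⟨⟨⟨-, h⟩, -⟩, -⟩; exact h.symm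
          · rintro rfl; exact ⟨⟨⟨hpre, rfl⟩, hcond.1⟩, by simp [hcond.2]⟩
        rw [show pvStep cs ((List.range m).foldl (pvStep cs) PySem.Dict.empty) m
            = (if (((List.range m).foldl (pvStep cs) PySem.Dict.empty).get? key).isNone
               then ((List.range m).foldl (pvStep cs) PySem.Dict.empty).insert key (m : Int)
               else ((List.range m).foldl (pvStep cs) PySem.Dict.empty)) by
          unfold pvStep; rw [if_pos hpre, if_pos hcond]]
        by_cases hnone : (((List.range m).foldl (pvStep cs) PySem.Dict.empty).get? key).isNone
        · rw [if_pos hnone]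
          by_cases hk : k = key
          · subst hk
            rw [PySem.Dict.get?_insert_self]
            have hfind : (List.range m).find? (fun pos => pvMatch cs key pos) = none := by
              rw [ih] at hnone
              simpa using hnone
            rw [hfind]
            simp [(hmk key).mpr rfl]
          · rw [PySem.Dict.get?_insert_of_ne _ _ hk, ih]
            have : pvMatch cs k m = false := by
              rcases h : pvMatch cs k m with _ | _
              · rfl
              · exact absurd ((hmk k).mp h) hk
            simp [this]
        · rw [if_neg hnone]
          rw [ih]
          by_cases hk : k = key
          · subst hk
            rcases h : (List.range m).find? (fun pos => pvMatch cs key pos) with _ | j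
            · rw [ih, h] at hnone; simp at hnone
            · simp
          · have : pvMatch cs k m = false := by
              rcases h : pvMatch cs k m with _ | _
              · rfl
              · exact absurd ((hmk k).mp h) hk
            simp [this]
      · have hstep : pvStep cs ((List.range m).foldl (pvStep cs) PySem.Dict.empty) m
            = (List.range m).foldl (pvStep cs) PySem.Dict.empty := by
          unfold pvStep; rw [if_pos hpre, if_neg hcond]
        rw [hstep, ih]
        have : pvMatch cs k m = false := by
          rcases h : pvMatch cs k m with _ | _
          · rfl
          · exfalso
            unfold pvMatch pvKey at h
            simp only [Bool.and_eq_true, beq_iff_eq, decide_eq_true_eq] at h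
            obtain ⟨⟨⟨-, hkk⟩, hlen⟩, hbr⟩ := h
            exact hcond ⟨by rw [hkey, hkk]; exact hlen, by rw [hkey, hkk]; exact hbr⟩
        simp [this]
    · have hstep : pvStep cs ((List.range m).foldl (pvStep cs) PySem.Dict.empty) m
          = (List.range m).foldl (pvStep cs) PySem.Dict.empty := by
        unfold pvStep; rw [if_neg hpre]
      rw [hstep, ih]
      have : pvMatch cs k m = false := by
        rcases h : pvMatch cs k m with _ | _
        · rfl
        · exfalso
          unfold pvMatch at h
          simp only [Bool.and_eq_true] at h
          exact hpre h.1.1.1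
      simp [this]

lemma pv_find?_range (p : Nat → Bool) (n j : Nat) (hj : j < n) (hpj : p j = true)
    (hmin : ∀ k < j, p k = false) : (List.range n).find? p = some j := by
  induction n with
  | zero => omega
  | succ n ih =>
    rw [List.range_succ, List.find?_append]
    rcases Nat.lt_or_ge j n with h | h
    · rw [ih h]; rfl
    · have hj' : j = n := by omega
      subst hj'
      have : (List.range j).find? p = none := by
        rw [List.find?_eq_none]
        intro x hx
        simp [hmin x (List.mem_range.mp hx)]
      rw [this]
      simp [hpj]

-- find of the tag vs. the single-pass first-occurrence table
lemma pv_link (cs t : List Char) (ht0 : t ≠ []) (htd : ∀ c ∈ t, pvDig c = true) :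
    PySem.Chars.find cs (pvP ++ t ++ [']'])
      = match ((List.range cs.length).find? (fun pos => pvMatch cs t pos)) with
        | none => -1
        | some j => (j : Int) := by
  rcases eq_or_lt_of_le (PySem.Chars.neg_one_le_find cs (pvP ++ t ++ [']'])) with h | h
  · rw [← h]
    have hni := (PySem.Chars.find_eq_neg_one_iff cs (pvP ++ t ++ [']'])).mp h.symm
    have : (List.range cs.length).find? (fun pos => pvMatch cs t pos) = none := by
      rw [List.find?_eq_none]
      intro pos _ hm
      exact hni ((PySem.Chars.isIn_iff_infix _ _).mp
        ((PySem.Chars.exists_prefix_drop_iff_isIn _ _).mp ⟨pos, (pv_hit_iff cs t ht0 htd pos).mpr hm⟩))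
    rw [this]
  · have h0 : 0 ≤ PySem.Chars.find cs (pvP ++ t ++ [']']) := by omega
    obtain ⟨hhit, hmin⟩ := PySem.Chars.find_spec h0
    set j := (PySem.Chars.find cs (pvP ++ t ++ [']'])).toNat with hj
    have hjn : j < cs.length := by
      by_contra hge
      rw [List.drop_eq_nil_of_le (by omega)] at hhit
      have := List.prefix_nil.mp hhit
      simp at this
    have : (List.range cs.length).find? (fun pos => pvMatch cs t pos) = some j := by
      apply pv_find?_range _ _ _ hjn ((pv_hit_iff cs t ht0 htd j).mp hhit)
      intro k hk
      rcases hmk : pvMatch cs t k with _ | _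
      · rfl
      · exact absurd ((pv_hit_iff cs t ht0 htd k).mpr hmk) (hmin k hk)
    rw [this]
    show PySem.Chars.find cs (pvP ++ t ++ [']']) = (j : Int)
    omega

-- the single item A's loop body appends for index i
def pvA (cs : List Char) (count i : Int) : String :=
  let start_tag : List Char := "[RESPONSE_".toList ++ PySem.Int.toChars i ++ "]".toList
  let end_tag : Option (List Char) :=
    if i < count then some ("[RESPONSE_".toList ++ PySem.Int.toChars (i + 1) ++ "]".toList)
    else none
  let start_idx := PySem.Chars.find cs start_tag
  if start_idx = -1 then String.ofList ("[批处理解析错误] 未找到 ".toList ++ start_tag)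
  else
    let start_idx := start_idx + (start_tag.length : Int)
    let end_idx : Int :=
      match end_tag with
      | some t =>
        let e := PySem.Chars.find cs t
        if e = -1 then (cs.length : Int) else e
      | none => (cs.length : Int)
    String.ofList (PySem.Chars.strip (PySem.Chars.slice cs (some start_idx) (some end_idx)))

-- the single item B's loop body appends for index i
def pvB (cs : List Char) (count : Int) (firsts : PySem.Dict (List Char) Int) (i : Int) : String :=
  match firsts.get? (PySem.Int.toChars i) with
  | none => String.ofList ("[批处理解析错误] 未找到 [RESPONSE_".toList ++ PySem.Int.toChars i ++ "]".toList)
  | some p =>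
    String.ofList (PySem.Chars.strip (PySem.Chars.slice cs
      (some (p + 10 + ((PySem.Int.toChars i).length : Int) + 1))
      (some (if i < count then firsts.getD (PySem.Int.toChars (i + 1)) (cs.length : Int)
             else (cs.length : Int)))))

lemma pv_link_none (cs t : List Char) (ht0 : t ≠ []) (htd : ∀ c ∈ t, pvDig c = true)
    (hf : (List.range cs.length).find? (fun pos => pvMatch cs t pos) = none) :
    PySem.Chars.find cs (pvP ++ t ++ [']']) = -1 := by
  rw [pv_link cs t ht0 htd, hf]

lemma pv_link_some (cs t : List Char) (ht0 : t ≠ []) (htd : ∀ c ∈ t, pvDig c = true) (j : Nat)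
    (hf : (List.range cs.length).find? (fun pos => pvMatch cs t pos) = some j) :
    PySem.Chars.find cs (pvP ++ t ++ [']']) = (j : Int) := by
  rw [pv_link cs t ht0 htd, hf]

lemma pv_point (cs : List Char) (count i : Int) (h1 : 1 ≤ i) :
    pvA cs count i = pvB cs count ((List.range cs.length).foldl (pvStep cs) PySem.Dict.empty) i := by
  obtain ⟨ht0, htd⟩ := pv_toChars_digits i h1
  obtain ⟨ht0', htd'⟩ := pv_toChars_digits (i + 1) (by omega)
  have hP : "[RESPONSE_".toList = pvP := rfl
  have hBr : "]".toList = [']'] := rfl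
  have hget := pv_fold_get cs cs.length (PySem.Int.toChars i)
  have hget' := pv_fold_get cs cs.length (PySem.Int.toChars (i + 1))
  unfold pvA pvB
  simp only [hP, hBr]
  rcases hf : (List.range cs.length).find? (fun pos => pvMatch cs (PySem.Int.toChars i) pos)
      with _ | j
  · rw [hf] at hget
    simp only [Option.map_none] at hget
    rw [pv_link_none cs _ ht0 htd hf]
    simp only [hget]
    have hlit : ("[批处理解析错误] 未找到 [RESPONSE_".toList : List Char)
        = "[批处理解析错误] 未找到 ".toList ++ pvP := by decide
    rw [hlit]
    simp [List.append_assoc]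
  · rw [hf] at hget
    simp only [Option.map_some] at hget
    rw [pv_link_some cs _ ht0 htd j hf]
    rw [if_neg (by omega)]
    simp only [hget]
    have hstart : (j : Int) + ((pvP ++ PySem.Int.toChars i ++ [']']).length : Int)
        = (j : Int) + 10 + ((PySem.Int.toChars i).length : Int) + 1 := by
      have h10 : (pvP.length : Int) = 10 := by decide
      push_cast [List.length_append, List.length_singleton]
      rw [h10]
      ring
    rw [hstart]
    have hend : (match (if i < count then some (pvP ++ PySem.Int.toChars (i + 1) ++ [']']) else none :
          Option (List Char)) with
        | some t =>
          let e := PySem.Chars.find cs t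
          if e = -1 then (cs.length : Int) else e
        | none => (cs.length : Int))
        = (if i < count then
            ((List.range cs.length).foldl (pvStep cs) PySem.Dict.empty).getD
              (PySem.Int.toChars (i + 1)) (cs.length : Int)
           else (cs.length : Int)) := by
      by_cases hic : i < count
      · simp only [if_pos hic]
        unfold PySem.Dict.getD
        rw [hget']
        rcases hf' : (List.range cs.length).find?
            (fun pos => pvMatch cs (PySem.Int.toChars (i + 1)) pos) with _ | j'
        · rw [pv_link_none cs _ ht0' htd' hf']
          simp
        · rw [pv_link_some cs _ ht0' htd' j' hf']
          rw [if_neg (by omega)]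
          simp
      · simp only [if_neg hic]
    rw [hend]

theorem pv_main (combined : String) (count : Int) :
    split_combined_result_py combined count = split_combined_result_py_alt combined count := by
  unfold split_combined_result_py split_combined_result_py_alt
  dsimp only
  set cs := combined.toList with hcs
  have hdict : (PySem.List.pyRange 0 (cs.length : Int)).foldl (fun d pos =>
      if "[RESPONSE_".toList.isPrefixOf (cs.drop pos.toNat) then
        let tail := cs.drop (pos.toNat + 10)
        let key := tail.takeWhile (fun c => decide ('0' ≤ c ∧ c ≤ '9'))
        if key.length > 0 ∧ tail[key.length]? = some ']' then
          if (d.get? key).isNone then d.insert key pos else d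
        else d
      else d) PySem.Dict.empty
    = (List.range cs.length).foldl (pvStep cs) PySem.Dict.empty := by
    rw [PySem.List.pyRange_zero_natCast, List.foldl_map]
    rfl
  rw [hdict]
  have hA : ∀ (l : List Int) (acc : List String),
      l.foldl (fun results i =>
        let start_tag : List Char := "[RESPONSE_".toList ++ PySem.Int.toChars i ++ "]".toList
        let end_tag : Option (List Char) :=
          if i < count then some ("[RESPONSE_".toList ++ PySem.Int.toChars (i + 1) ++ "]".toList)
          else none
        let start_idx := PySem.Chars.find cs start_tag
        if start_idx = -1 then
          results ++ [String.ofList ("[批处理解析错误] 未找到 ".toList ++ start_tag)]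
        else
          let start_idx := start_idx + (start_tag.length : Int)
          let end_idx : Int :=
            match end_tag with
            | some t =>
              let e := PySem.Chars.find cs t
              if e = -1 then (cs.length : Int) else e
            | none => (cs.length : Int)
          results ++ [String.ofList (PySem.Chars.strip
              (PySem.Chars.slice cs (some start_idx) (some end_idx)))]) acc
      = acc ++ l.map (pvA cs count) := by
    intro l
    induction l with
    | nil => simp
    | cons x xs ih =>
      intro acc
      rw [List.foldl_cons, ih]
      dsimp only
      rw [show (if PySem.Chars.find cs ("[RESPONSE_".toList ++ PySem.Int.toChars x ++ "]".toList) = -1 then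
          acc ++ [String.ofList ("[批处理解析错误] 未找到 ".toList ++
            ("[RESPONSE_".toList ++ PySem.Int.toChars x ++ "]".toList))]
        else
          acc ++ [String.ofList (PySem.Chars.strip (PySem.Chars.slice cs
            (some (PySem.Chars.find cs ("[RESPONSE_".toList ++ PySem.Int.toChars x ++ "]".toList)
              + (("[RESPONSE_".toList ++ PySem.Int.toChars x ++ "]".toList).length : Int)))
            (some (match (if x < count then
                some ("[RESPONSE_".toList ++ PySem.Int.toChars (x + 1) ++ "]".toList) else none :
                  Option (List Char)) with
              | some t =>
                let e := PySem.Chars.find cs t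
                if e = -1 then (cs.length : Int) else e
              | none => (cs.length : Int)))))])
        = acc ++ [pvA cs count x] from (apply_ite (fun s => acc ++ [s]) _ _ _).symm]
      simp [List.map_cons]
  rw [hA]
  have hB : ∀ (l : List Int) (acc : List String),
      l.foldl (fun out i =>
        let s := PySem.Int.toChars i
        match ((List.range cs.length).foldl (pvStep cs) PySem.Dict.empty).get? s with
        | none => out ++ [String.ofList ("[批处理解析错误] 未找到 [RESPONSE_".toList ++ s ++ "]".toList)]
        | some p =>
          let start := p + 10 + (s.length : Int) + 1
          let endI : Int := if i < count then
              ((List.range cs.length).foldl (pvStep cs) PySem.Dict.empty).getD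
                (PySem.Int.toChars (i + 1)) (cs.length : Int)
            else (cs.length : Int)
          out ++ [String.ofList (PySem.Chars.strip
              (PySem.Chars.slice cs (some start) (some endI)))]) acc
      = acc ++ l.map (pvB cs count ((List.range cs.length).foldl (pvStep cs) PySem.Dict.empty)) := by
    intro l
    induction l with
    | nil => simp
    | cons x xs ih =>
      intro acc
      rw [List.foldl_cons, ih]
      dsimp only
      have hone : (match ((List.range cs.length).foldl (pvStep cs) PySem.Dict.empty).get?
            (PySem.Int.toChars x) with
        | none => acc ++ [String.ofList ("[批处理解析错误] 未找到 [RESPONSE_".toList ++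
            PySem.Int.toChars x ++ "]".toList)]
        | some p =>
          acc ++ [String.ofList (PySem.Chars.strip (PySem.Chars.slice cs
            (some (p + 10 + ((PySem.Int.toChars x).length : Int) + 1))
            (some (if x < count then
                ((List.range cs.length).foldl (pvStep cs) PySem.Dict.empty).getD
                  (PySem.Int.toChars (x + 1)) (cs.length : Int)
              else (cs.length : Int)))))])
          = acc ++ [pvB cs count ((List.range cs.length).foldl (pvStep cs) PySem.Dict.empty) x] := by
        unfold pvB
        rcases hg : ((List.range cs.length).foldl (pvStep cs) PySem.Dict.empty).get?
            (PySem.Int.toChars x) with _ | p <;> rfl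
      rw [hone]
      simp [List.map_cons]
  rw [hB]
  simp only [List.nil_append]
  by_cases hc : count ≤ 0
  · have hnil : PySem.List.pyRange 1 (count + 1) = [] := by
      rw [PySem.List.pyRange_of_pos _ _ (by norm_num), if_neg (by omega)]
      simp
    rw [hnil]
    simp only [List.map_nil, List.nil_append, List.length_nil]
    apply List.eq_nil_iff_forall_not_mem.mpr
    intro x hx
    have := PySem.List.mem_of_mem_slice _ _ _ hx
    simp at this
    exact absurd this.1 (by omega)
  · have hlenr : (PySem.List.pyRange 1 (count + 1)).length = count.toNat := by
      rw [PySem.List.pyRange_of_pos _ _ (by norm_num), if_pos (by omega)]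
      simp
    have hlen : (List.map (pvA cs count) (PySem.List.pyRange 1 (count + 1))).length
        = count.toNat := by rw [List.length_map, hlenr]
    rw [show count.toNat - (List.map (pvA cs count) (PySem.List.pyRange 1 (count + 1))).length = 0
        from by rw [hlen]; omega]
    simp only [List.replicate_zero, List.append_nil]
    rw [PySem.List.slice_to _ (by omega : (0:Int) ≤ count),
      show count.toNat = (List.map (pvA cs count) (PySem.List.pyRange 1 (count + 1))).length
        from hlen.symm, List.take_length]
    apply List.map_congr_left
    intro i hi
    exact pv_point cs count i (PySem.List.mem_pyRange_one.mp hi).1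

-- ===== VERDICT (by name: the statement is the Claim_ definition above) =====
theorem split_combined_result_py_spec : Claim_equal_split_combined_result_py := by
  intro combined count _
  unfold Spec_split_combined_result_py
  exact pv_main combined count
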